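-- pv_equiv track=rewrite | github.com/23001204-NithulChandralal/VScode | Modules/C110/P13/Q6.py | translate_to_score
-- ===== SOURCE A (Python) =====
-- def translate_to_score(symbols):
--     total_score = 0
--     for symbol in symbols:
--         if symbol == '$':
--             total_score += 5
--         elif symbol == '@':
--             total_score += 3
--         elif symbol == '#':
--             total_score += 1
--     return total_score
-- ===== SOURCE B (Python) =====
-- def translate_to_score(symbols):
--     freq = {}
--     for s in symbols:
--         freq[s] = freq.get(s, 0) + 1
--     return 5 * freq.get('$', 0) + 3 * freq.get('@', 0) + freq.get('#', 0)
-- ===== Notes on version B (the rewrite author's own statement) =====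
-- stated objective: alternative
-- what changed: Replaced A's single accumulating loop with an if/elif weight dispatch by a two-stage histogram algorithm: first build a character-frequency dict with no branching, then combine only the three relevant counts by a closed arithmetic formula.
import Mathlib
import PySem

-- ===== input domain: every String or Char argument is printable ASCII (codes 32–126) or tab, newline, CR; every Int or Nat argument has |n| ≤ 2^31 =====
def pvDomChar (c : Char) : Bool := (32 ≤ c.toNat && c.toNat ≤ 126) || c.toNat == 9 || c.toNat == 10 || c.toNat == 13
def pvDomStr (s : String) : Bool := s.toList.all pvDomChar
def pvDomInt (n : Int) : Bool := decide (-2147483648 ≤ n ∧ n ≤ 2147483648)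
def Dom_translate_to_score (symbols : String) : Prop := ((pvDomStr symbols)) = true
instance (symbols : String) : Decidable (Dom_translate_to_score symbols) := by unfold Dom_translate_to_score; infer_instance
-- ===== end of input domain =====

-- B builds a character-frequency dict in a branch-free pass, then combines the three relevant counts arithmetically (alternative decomposition, same cost).

-- ===== PORT A =====
def translate_to_score (symbols : String) : Int :=
  symbols.toList.foldl (fun total_score symbol =>
    if symbol = '$' then total_score + 5
    else if symbol = '@' then total_score + 3
    else if symbol = '#' then total_score + 1
    else total_score) 0

-- ===== PORT B =====
def translate_to_score_alt (symbols : String) : Int :=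
  let freq : PySem.Dict Char Int :=
    symbols.toList.foldl (fun d s => d.insert s (d.getD s 0 + 1)) PySem.Dict.empty
  5 * freq.getD '$' 0 + 3 * freq.getD '@' 0 + freq.getD '#' 0

-- ===== PRECONDITION & SPEC =====
def Spec_translate_to_score (symbols : String) (out : Int) : Prop := out = translate_to_score_alt symbols
instance (symbols : String) (out : Int) : Decidable (Spec_translate_to_score symbols out) := by unfold Spec_translate_to_score; infer_instance

-- ===== CLAIM (what is proved, stated in full; the proofs are below) =====
def Claim_equal_translate_to_score : Prop := ∀ (symbols : String), Dom_translate_to_score symbols → Spec_translate_to_score symbols (translate_to_score symbols)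

-- ===== LEMMAS AND PROOFS =====

-- A's loop computes the weighted sum of the three character counts
theorem foldl_score (l : List Char) (a : Int) :
    l.foldl (fun total_score symbol =>
      if symbol = '$' then total_score + 5
      else if symbol = '@' then total_score + 3
      else if symbol = '#' then total_score + 1
      else total_score) a
    = a + 5 * (l.count '$' : Int) + 3 * (l.count '@' : Int) + (l.count '#' : Int) := by
  induction l generalizing a with
  | nil => simp
  | cons x t ih =>
    rw [List.foldl_cons]
    by_cases h1 : x = '$'
    · subst h1
      rw [if_pos rfl, ih, List.count_cons_self,
        List.count_cons_of_ne (by decide), List.count_cons_of_ne (by decide)]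
      push_cast; ring
    · by_cases h2 : x = '@'
      · subst h2
        rw [if_neg (by decide), if_pos rfl, ih, List.count_cons_self,
          List.count_cons_of_ne (by decide), List.count_cons_of_ne (by decide)]
        push_cast; ring
      · by_cases h3 : x = '#'
        · subst h3
          rw [if_neg (by decide), if_neg (by decide), if_pos rfl, ih, List.count_cons_self,
            List.count_cons_of_ne (by decide), List.count_cons_of_ne (by decide)]
          push_cast; ring
        · rw [if_neg h1, if_neg h2, if_neg h3, ih,
            List.count_cons_of_ne h1, List.count_cons_of_ne h2,
            List.count_cons_of_ne h3]

-- ===== VERDICT (by name: the statement is the Claim_ definition above) =====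
theorem translate_to_score_spec : Claim_equal_translate_to_score := by
  intro symbols _
  unfold Spec_translate_to_score translate_to_score translate_to_score_alt
  rw [foldl_score, PySem.Dict.foldl_insert_getD_add_one_eq_counter]
  show _ = 5 * (PySem.Dict.counter symbols.toList).getD '$' 0
        + 3 * (PySem.Dict.counter symbols.toList).getD '@' 0
        + (PySem.Dict.counter symbols.toList).getD '#' 0
  rw [PySem.Dict.getD_counter, PySem.Dict.getD_counter, PySem.Dict.getD_counter]
  ring
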